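-- pv_equiv track=rewrite | github.com/chaitanyakrishnavakkanti/taas | scoring_engine.py | missing_metric_issues
-- ===== SOURCE A (Python) =====
-- CRITERIA_LABELS = {
--     "grammar_correctness": "Grammar Correctness",
--     "clarity_readability": "Clarity & Readability",
--     "sentence_structure": "Sentence Structure",
--     "completeness": "Completeness",
--     "noise_reduction": "Noise Reduction",
-- }
--
-- _ALIASES = {
--     "grammar": "grammar_correctness",
--     "grammar_correctness": "grammar_correctness",
--     "grammarCorrectness": "grammar_correctness",
--     "clarity": "clarity_readability",
--     "clarity_readability": "clarity_readability",
--     "clarityReadability": "clarity_readability",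
--     "readability": "clarity_readability",
--     "sentence_structure": "sentence_structure",
--     "sentenceStructure": "sentence_structure",
--     "structure": "sentence_structure",
--     "completeness": "completeness",
--     "meaning_preservation": "completeness",
--     "meaningPreservation": "completeness",
--     "noise_reduction": "noise_reduction",
--     "noiseReduction": "noise_reduction",
--     "filler_removal": "noise_reduction",
--     "fillerRemoval": "noise_reduction",
-- }
--
-- def missing_metric_issues(metric_scores):
--     provided = set((metric_scores or {}).keys()) if isinstance(metric_scores, dict) else set()
--     missing = []
--
--     for key, label in CRITERIA_LABELS.items():
--         aliases_for_key = {alias for alias, target in _ALIASES.items() if target == key}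
--         if key not in provided and not aliases_for_key.intersection(provided):
--             missing.append(f"Validation model did not provide a {label} score.")
--
--     return missing
-- ===== SOURCE B (Python) =====
-- CRITERIA_LABELS = {
--     "grammar_correctness": "Grammar Correctness",
--     "clarity_readability": "Clarity & Readability",
--     "sentence_structure": "Sentence Structure",
--     "completeness": "Completeness",
--     "noise_reduction": "Noise Reduction",
-- }
--
-- _ALIASES = {
--     "grammar": "grammar_correctness",
--     "grammar_correctness": "grammar_correctness",
--     "grammarCorrectness": "grammar_correctness",
--     "clarity": "clarity_readability",
--     "clarity_readability": "clarity_readability",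
--     "clarityReadability": "clarity_readability",
--     "readability": "clarity_readability",
--     "sentence_structure": "sentence_structure",
--     "sentenceStructure": "sentence_structure",
--     "structure": "sentence_structure",
--     "completeness": "completeness",
--     "meaning_preservation": "completeness",
--     "meaningPreservation": "completeness",
--     "noise_reduction": "noise_reduction",
--     "noiseReduction": "noise_reduction",
--     "filler_removal": "noise_reduction",
--     "fillerRemoval": "noise_reduction",
-- }
--
-- def missing_metric_issues(metric_scores):
--     scores = metric_scores if isinstance(metric_scores, dict) else {}
--     covered = {_ALIASES[k] for k in scores if k in _ALIASES}
--     return [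
--         f"Validation model did not provide a {label} score."
--         for key, label in CRITERIA_LABELS.items()
--         if key not in covered
--     ]
-- ===== Notes on version B (the rewrite author's own statement) =====
-- stated objective: simpler
-- what changed: Instead of rebuilding the alias set for every criterion and intersecting it with the provided keys (criteria x aliases nested scan), B maps each provided key through _ALIASES once to form the covered canonical set, then a single comprehension over CRITERIA_LABELS keeps the criteria not covered.
import Mathlib
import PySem

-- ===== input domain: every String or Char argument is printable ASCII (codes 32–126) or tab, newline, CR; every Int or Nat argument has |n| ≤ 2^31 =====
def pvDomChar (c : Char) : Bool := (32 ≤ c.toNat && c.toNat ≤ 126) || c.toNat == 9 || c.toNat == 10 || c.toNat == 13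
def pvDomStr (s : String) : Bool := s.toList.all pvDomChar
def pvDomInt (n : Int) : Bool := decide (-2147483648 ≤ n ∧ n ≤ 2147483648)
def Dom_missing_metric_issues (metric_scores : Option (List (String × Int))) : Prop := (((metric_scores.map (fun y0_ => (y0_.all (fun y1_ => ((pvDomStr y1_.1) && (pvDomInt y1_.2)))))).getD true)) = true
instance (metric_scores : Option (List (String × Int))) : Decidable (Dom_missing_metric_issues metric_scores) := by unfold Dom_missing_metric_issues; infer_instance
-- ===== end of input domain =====

-- B builds the covered canonical-key set by one pass through the provided keys
-- via the alias table, replacing A's per-criterion alias-set rebuild and intersection.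

-- module-level constants shared by both programs
def criteriaLabels : List (String × String) :=
  [("grammar_correctness", "Grammar Correctness"),
   ("clarity_readability", "Clarity & Readability"),
   ("sentence_structure", "Sentence Structure"),
   ("completeness", "Completeness"),
   ("noise_reduction", "Noise Reduction")]

def aliasesList : List (String × String) :=
  [("grammar", "grammar_correctness"),
   ("grammar_correctness", "grammar_correctness"),
   ("grammarCorrectness", "grammar_correctness"),
   ("clarity", "clarity_readability"),
   ("clarity_readability", "clarity_readability"),
   ("clarityReadability", "clarity_readability"),
   ("readability", "clarity_readability"),
   ("sentence_structure", "sentence_structure"),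
   ("sentenceStructure", "sentence_structure"),
   ("structure", "sentence_structure"),
   ("completeness", "completeness"),
   ("meaning_preservation", "completeness"),
   ("meaningPreservation", "completeness"),
   ("noise_reduction", "noise_reduction"),
   ("noiseReduction", "noise_reduction"),
   ("filler_removal", "noise_reduction"),
   ("fillerRemoval", "noise_reduction")]

-- ===== PORT A =====
def missing_metric_issues (metric_scores : Option (List (String × Int))) : List String :=
  let provided : PySem.Set String := PySem.Set.ofList ((metric_scores.getD []).map (·.1))
  criteriaLabels.foldl (fun missing kl =>
    let aliasesForKey : PySem.Set String :=
      PySem.Set.ofList (aliasesList.filterMap (fun p => if p.2 == kl.1 then some p.1 else none))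
    if !(PySem.Set.contains provided kl.1) && (PySem.Set.inter aliasesForKey provided).isEmpty
    then missing ++ ["Validation model did not provide a " ++ kl.2 ++ " score."]
    else missing) []

-- ===== PORT B =====
def aliasesDict : PySem.Dict String String := PySem.Dict.ofList aliasesList

def missing_metric_issues_alt (metric_scores : Option (List (String × Int))) : List String :=
  let scoreKeys : List String := PySem.List.dedup ((metric_scores.getD []).map (·.1))
  let covered : PySem.Set String :=
    PySem.Set.ofList (scoreKeys.filterMap (fun s => aliasesDict.get? s))
  criteriaLabels.filterMap (fun kl =>
    if PySem.Set.contains covered kl.1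
    then none
    else some ("Validation model did not provide a " ++ kl.2 ++ " score."))

-- ===== PRECONDITION & SPEC =====
def Spec_missing_metric_issues (metric_scores : Option (List (String × Int))) (out : List String) : Prop := out = missing_metric_issues_alt metric_scores
instance (metric_scores : Option (List (String × Int))) (out : List String) : Decidable (Spec_missing_metric_issues metric_scores out) := by unfold Spec_missing_metric_issues; infer_instance

-- ===== CLAIM (what is proved, stated in full; the proofs are below) =====
def Claim_equal_missing_metric_issues : Prop := ∀ (metric_scores : Option (List (String × Int))), Dom_missing_metric_issues metric_scores → Spec_missing_metric_issues metric_scores (missing_metric_issues metric_scores)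

-- ===== LEMMAS AND PROOFS =====

-- the concrete alias dict looks up exactly the pairs of aliasesList
lemma aliasesDict_items : aliasesDict.items = aliasesList := by decide

lemma aliasesDict_nodup : aliasesDict.keys.Nodup := by decide

lemma get?_iff (s k : String) : aliasesDict.get? s = some k ↔ (s, k) ∈ aliasesList := by
  rw [PySem.Dict.get?_eq_some_iff_mem_items aliasesDict s k aliasesDict_nodup, aliasesDict_items]

lemma mem_aliasOf (k s : String) :
    s ∈ aliasesList.filterMap (fun p => if p.2 == k then some p.1 else none) ↔ (s, k) ∈ aliasesList := by
  simp only [List.mem_filterMap]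
  constructor
  · rintro ⟨⟨a, b⟩, hmem, h⟩
    by_cases hb : b == k
    · simp only [hb, if_true, Option.some.injEq] at h
      subst h; rcases eq_of_beq hb; exact hmem
    · simp [hb] at h
  · intro h
    exact ⟨(s, k), h, by simp⟩

-- a Python list-comprehension with an 'if' guard is a filter-then-map
lemma filterMap_ite {α β : Type} (l : List α) (p : α → Bool) (g : α → β) :
    l.filterMap (fun x => if p x then none else some (g x)) = (l.filter (fun x => !p x)).map g := by
  induction l with
  | nil => rfl
  | cons a t ih => by_cases h : p a <;> simp [h, ih]

-- the two per-criterion tests agree, for any criterion key that is its own alias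
lemma cond_iff (keys : List String) (k : String) (hkk : (k, k) ∈ aliasesList) :
    (!(PySem.Set.contains (PySem.Set.ofList keys) k) &&
      (PySem.Set.inter
        (PySem.Set.ofList (aliasesList.filterMap (fun p => if p.2 == k then some p.1 else none)))
        (PySem.Set.ofList keys)).isEmpty)
    = !(PySem.Set.contains
        (PySem.Set.ofList ((PySem.List.dedup keys).filterMap (fun s => aliasesDict.get? s))) k) := by
  have hA : (!(PySem.Set.contains (PySem.Set.ofList keys) k) &&
      (PySem.Set.inter
        (PySem.Set.ofList (aliasesList.filterMap (fun p => if p.2 == k then some p.1 else none)))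
        (PySem.Set.ofList keys)).isEmpty) = true
      ↔ ∀ s : String, (s, k) ∈ aliasesList → s ∉ keys := by
    rw [Bool.and_eq_true, Bool.not_eq_true', List.isEmpty_iff, List.eq_nil_iff_forall_not_mem]
    constructor
    · rintro ⟨-, hemp⟩ s hs hsk
      exact hemp s (by
        rw [PySem.Set.mem_inter, PySem.Set.mem_ofList, PySem.Set.mem_ofList, mem_aliasOf]
        exact ⟨hs, hsk⟩)
    · intro h
      refine ⟨?_, fun s hs => ?_⟩
      · rw [← Bool.not_eq_true, PySem.Set.contains_iff, PySem.Set.mem_ofList]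
        exact h k hkk
      · rw [PySem.Set.mem_inter, PySem.Set.mem_ofList, PySem.Set.mem_ofList, mem_aliasOf] at hs
        exact h s hs.1 hs.2
  have hB : (!(PySem.Set.contains
        (PySem.Set.ofList ((PySem.List.dedup keys).filterMap (fun s => aliasesDict.get? s))) k)) = true
      ↔ ∀ s : String, (s, k) ∈ aliasesList → s ∉ keys := by
    rw [Bool.not_eq_true', Bool.eq_false_iff]
    constructor
    · intro h s hsk hs
      apply h
      rw [PySem.Set.contains_iff, PySem.Set.mem_ofList, List.mem_filterMap]
      exact ⟨s, (PySem.List.mem_dedup _ _).mpr hs, (get?_iff s k).mpr hsk⟩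
    · intro h hc
      rw [PySem.Set.contains_iff, PySem.Set.mem_ofList, List.mem_filterMap] at hc
      obtain ⟨s, hs, hsk⟩ := hc
      exact h s ((get?_iff s k).mp hsk) ((PySem.List.mem_dedup _ _).mp hs)
  exact Bool.eq_iff_iff.mpr (hA.trans hB.symm)

-- ===== VERDICT (by name: the statement is the Claim_ definition above) =====
theorem missing_metric_issues_spec : Claim_equal_missing_metric_issues := by
  intro ms _
  simp only [Spec_missing_metric_issues, missing_metric_issues, missing_metric_issues_alt]
  rw [PySem.List.foldl_congr_mem'
        (g := fun missing kl =>
          if !(PySem.Set.contains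
              (PySem.Set.ofList ((PySem.List.dedup ((ms.getD []).map (·.1))).filterMap
                (fun s => aliasesDict.get? s))) kl.1)
          then missing ++ ["Validation model did not provide a " ++ kl.2 ++ " score."]
          else missing)
        (h := by
          intro kl hkl acc
          have hself : (kl.1, kl.1) ∈ aliasesList := by
            simp only [criteriaLabels, List.mem_cons, List.not_mem_nil, or_false] at hkl
            rcases hkl with h | h | h | h | h <;> subst h <;> decide
          rw [cond_iff ((ms.getD []).map (·.1)) kl.1 hself]),
      PySem.List.foldl_append_if, List.nil_append, filterMap_ite]
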